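-- pv_equiv track=rewrite | github.com/aadarshkalyaan/CAD_for_VLSI_Repo | mac_verif/testcases.py | generate_cycling_walking_ones
-- ===== SOURCE A (Python) =====
-- def generate_cycling_walking_ones(width):
--     """
--     Generates a list of binary strings representing the 'cycling walking 1s' pattern for the given bit width.
--     The number of 1s in each pattern will not exceed the bit width.
--
--     Parameters:
--     width (int): The number of bits in the pattern (must be positive)
--
--     Returns:
--     list of str: The list of binary strings
--     """
--     if width <= 0:
--         raise ValueError("Bit width must be a positive integer")
--
--     patterns = []
--     for num_ones in range(1, width+1):
--         for i in range(width - num_ones + 1):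
--             pattern = '0' * i + '1' * num_ones + '0' * (width - i - num_ones)
--             patterns.append(pattern)
--     return patterns
-- ===== SOURCE B (Python) =====
-- def generate_cycling_walking_ones(width):
--     """Walking-ones patterns via incremental sliding of the one-block
--     instead of recomputing three string repetitions per pattern."""
--     if width <= 0:
--         raise ValueError("Bit width must be a positive integer")
--     patterns = []
--     for num_ones in range(1, width + 1):
--         pattern = '1' * num_ones + '0' * (width - num_ones)
--         patterns.append(pattern)
--         for _ in range(width - num_ones):
--             pattern = '0' + pattern[:-1]
--             patterns.append(pattern)
--     return patterns
-- ===== Notes on version B (the rewrite author's own statement) =====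
-- stated objective: alternative
-- what changed: B builds each one-block row once flush-left and then slides it right incrementally with pattern = '0' + pattern[:-1], instead of recomputing three string repetitions for every pattern as A's inner loop does.
import Mathlib
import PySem

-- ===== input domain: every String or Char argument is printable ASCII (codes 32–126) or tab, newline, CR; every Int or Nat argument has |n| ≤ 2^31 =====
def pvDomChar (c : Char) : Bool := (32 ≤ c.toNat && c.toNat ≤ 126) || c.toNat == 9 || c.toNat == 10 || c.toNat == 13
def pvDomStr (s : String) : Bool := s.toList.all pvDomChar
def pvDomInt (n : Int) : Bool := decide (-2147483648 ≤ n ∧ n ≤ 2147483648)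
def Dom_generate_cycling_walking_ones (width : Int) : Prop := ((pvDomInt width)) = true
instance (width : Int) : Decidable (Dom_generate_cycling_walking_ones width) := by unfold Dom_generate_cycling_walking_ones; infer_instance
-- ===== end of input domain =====

-- B slides the one-block right with '0' + pattern[:-1] instead of recomputing three string repetitions per pattern (objective: alternative decomposition).

-- ===== PORT A =====
-- A: for each num_ones, rebuild every pattern from three repetitions '0'*i + '1'*num_ones + '0'*(width-i-num_ones).
-- (the ValueError branch for width ≤ 0 is excluded by Pre_; the port returns [] there)
def generate_cycling_walking_ones (width : Int) : List String :=
  if width ≤ 0 then []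
  else
    (PySem.List.pyRange 1 (width + 1)).foldl (fun patterns num_ones =>
      (PySem.List.pyRange 0 (width - num_ones + 1)).foldl (fun patterns i =>
        patterns ++ [String.ofList (List.replicate i.toNat '0' ++
          List.replicate num_ones.toNat '1' ++
          List.replicate (width - i - num_ones).toNat '0')]) patterns) []

-- ===== PORT B =====
-- inner loop of B: k more slides of 'pattern = "0" + pattern[:-1]', appending each
def altSlide (k : Nat) (pattern : List Char) (acc : List String) : List String :=
  match k with
  | 0 => acc
  | Nat.succ k =>
    let p := '0' :: PySem.List.slice pattern none (some (-1))
    altSlide k p (acc ++ [String.ofList p])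

def generate_cycling_walking_ones_alt (width : Int) : List String :=
  if width ≤ 0 then []
  else
    (PySem.List.pyRange 1 (width + 1)).foldl (fun patterns num_ones =>
      let pattern := List.replicate num_ones.toNat '1' ++
        List.replicate (width - num_ones).toNat '0'
      altSlide (width - num_ones).toNat pattern (patterns ++ [String.ofList pattern])) []

-- ===== PRECONDITION & SPEC =====
-- Pre_ excludes exactly width ≤ 0, where the Python A (and B) raise ValueError.
def Pre_generate_cycling_walking_ones (width : Int) : Prop := 0 < width
instance (width : Int) : Decidable (Pre_generate_cycling_walking_ones width) := by unfold Pre_generate_cycling_walking_ones; infer_instance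
def pvWitness_generate_cycling_walking_ones : Int := (3)

def Spec_generate_cycling_walking_ones (width : Int) (out : List String) : Prop := out = generate_cycling_walking_ones_alt width
instance (width : Int) (out : List String) : Decidable (Spec_generate_cycling_walking_ones width out) := by unfold Spec_generate_cycling_walking_ones; infer_instance

-- ===== CLAIM (what is proved, stated in full; the proofs are below) =====
def Claim_equal_generate_cycling_walking_ones : Prop := ∀ (width : Int), Dom_generate_cycling_walking_ones width → Pre_generate_cycling_walking_ones width → Spec_generate_cycling_walking_ones width (generate_cycling_walking_ones width)

-- ===== LEMMAS AND PROOFS =====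

-- the pattern with the one-block at offset i, for total width w and n ones
def pat (w n i : Nat) : List Char :=
  List.replicate i '0' ++ List.replicate n '1' ++ List.replicate (w - n - i) '0'

lemma slice_neg_one_eq_dropLast (cs : List Char) :
    PySem.List.slice cs none (some (-1)) = cs.dropLast := by
  simp [PySem.List.slice, PySem.List.clampIdx]
  rcases cs with _ | ⟨c, cs⟩
  · simp
  · simp [List.dropLast_eq_take]

lemma slide_pat (w n i : Nat) (h : n + i < w) :
    '0' :: (pat w n i).dropLast = pat w n (i + 1) := by
  have h1 : w - n - i = (w - n - (i + 1)) + 1 := by omega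
  unfold pat
  rw [h1, List.replicate_succ']
  simp [← List.append_assoc, List.replicate_succ]

lemma range_succ_map_shift (f : Nat → String) (k : Nat) :
    f 0 :: (List.range k).map (fun j => f (j + 1)) = (List.range (k + 1)).map f := by
  simp [List.range_succ_eq_map, List.map_map, Function.comp]

lemma altSlide_pat (w n : Nat) : ∀ (k i : Nat) (acc : List String), n + i + k ≤ w →
    altSlide k (pat w n i) acc
      = acc ++ (List.range k).map (fun j => String.ofList (pat w n (i + 1 + j))) := by
  intro k
  induction k with
  | zero => intro i acc _; simp [altSlide]
  | succ k ih =>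
    intro i acc h
    have hp : '0' :: PySem.List.slice (pat w n i) none (some (-1)) = pat w n (i + 1) := by
      rw [slice_neg_one_eq_dropLast]; exact slide_pat w n i (by omega)
    simp only [altSlide, hp]
    rw [ih (i + 1) _ (by omega), List.append_assoc,
      ← range_succ_map_shift (fun j => String.ofList (pat w n (i + 1 + j))) k]
    simp only [List.singleton_append, Nat.add_zero]
    refine congrArg₂ (· ++ ·) rfl ?_
    refine congrArg₂ List.cons rfl ?_
    apply List.map_congr_left
    intro j _
    have hj : i + 1 + 1 + j = i + 1 + (j + 1) := by omega
    rw [hj]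

lemma block_eq (width : Int) (num_ones : Int) (acc : List String)
    (h1 : 1 ≤ num_ones) (h2 : num_ones < width + 1) :
    (PySem.List.pyRange 0 (width - num_ones + 1)).foldl (fun patterns i =>
        patterns ++ [String.ofList (List.replicate i.toNat '0' ++
          List.replicate num_ones.toNat '1' ++
          List.replicate (width - i - num_ones).toNat '0')]) acc
      = altSlide (width - num_ones).toNat
          (List.replicate num_ones.toNat '1' ++ List.replicate (width - num_ones).toNat '0')
          (acc ++ [String.ofList (List.replicate num_ones.toNat '1' ++
            List.replicate (width - num_ones).toNat '0')]) := by
  set w : Nat := width.toNat with hw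
  set n : Nat := num_ones.toNat with hn
  have hwn : n ≤ w := by omega
  have hn1 : 1 ≤ n := by omega
  have hwidth : width = (w : Int) := by omega
  have hnum : num_ones = (n : Int) := by omega
  -- the base pattern is pat w n 0
  have hbase : List.replicate num_ones.toNat '1' ++ List.replicate (width - num_ones).toNat '0'
      = pat w n 0 := by
    have hsub : ((w : Int) - (n : Int)).toNat = w - n := by omega
    simp [pat, hwidth, hnum, hsub]
  -- B side: base + slides = map over range (w - n + 1)
  have hB : altSlide (width - num_ones).toNat (pat w n 0) (acc ++ [String.ofList (pat w n 0)])
      = acc ++ (List.range (w - n + 1)).map (fun i => String.ofList (pat w n i)) := by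
    have hk : (width - num_ones).toNat = w - n := by omega
    rw [hk, altSlide_pat w n (w - n) 0 _ (by omega), List.append_assoc,
      ← range_succ_map_shift (fun i => String.ofList (pat w n i)) (w - n)]
    simp only [List.singleton_append]
    refine congrArg₂ (· ++ ·) rfl ?_
    refine congrArg₂ List.cons rfl ?_
    apply List.map_congr_left
    intro j _
    have hj : 0 + 1 + j = j + 1 := by omega
    rw [hj]
  -- A side: the append-singleton foldl is acc ++ map
  rw [PySem.List.foldl_append_singleton_eq_map, hbase, hB]
  congr 1
  have hb : width - num_ones + 1 = ((w - n + 1 : Nat) : Int) := by omega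
  rw [hb, PySem.List.pyRange_zero_natCast, List.map_map]
  apply List.map_congr_left
  intro i hi
  simp only [List.mem_range] at hi
  have hwi : ((w : Int) - (i : Int) - (n : Int)).toNat = w - n - i := by omega
  simp [Function.comp, pat, hwidth, hnum, hwi]

-- ===== VERDICT (by name: the statement is the Claim_ definition above) =====
theorem generate_cycling_walking_ones_spec : Claim_equal_generate_cycling_walking_ones := by
  intro width _ hpre
  unfold Spec_generate_cycling_walking_ones generate_cycling_walking_ones generate_cycling_walking_ones_alt
  have hne : ¬ width ≤ 0 := by exact not_le.mpr hpre
  rw [if_neg hne, if_neg hne]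
  apply PySem.List.foldl_congr_mem
  intro acc num_ones hmem
  rw [PySem.List.mem_pyRange_one] at hmem
  exact block_eq width num_ones acc hmem.1 hmem.2
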